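-- pv_equiv track=rewrite | github.com/pypi-data/pypi-mirror-404 | packages/numthy/numthy-0.1.0.tar.gz/numthy-0.1.0/tests/test_diophantine.py | brute_force_conic
-- ===== SOURCE A (Python) =====
-- def brute_force_conic(a: int, b: int, c: int, d: int, e: int, f: int, bound: int):
--     sols = set()
--     for x in range(-bound, bound + 1):
--         for y in range(-bound, bound + 1):
--             v = a * x * x + b * x * y + c * y * y + d * x + e * y + f
--             if v == 0:
--                 sols.add((x, y))
--     return sols
-- ===== SOURCE B (Python) =====
-- from math import isqrt
--
-- def brute_force_conic(a: int, b: int, c: int, d: int, e: int, f: int, bound: int):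
--     # Per x, solve c*y^2 + (b*x+e)*y + (a*x^2+d*x+f) = 0 exactly instead of scanning all y.
--     sols = []
--     for x in range(-bound, bound + 1):
--         B = b * x + e
--         C = a * x * x + d * x + f
--         if c == 0:
--             if B == 0:
--                 ys = list(range(-bound, bound + 1)) if C == 0 else []
--             else:
--                 q, r = divmod(-C, B)
--                 ys = [q] if r == 0 else []
--         else:
--             disc = B * B - 4 * c * C
--             if disc < 0:
--                 ys = []
--             else:
--                 s = isqrt(disc)
--                 if s * s != disc:
--                     ys = []
--                 else:
--                     ys = []
--                     for t in ([-s, s] if s > 0 else [0]):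
--                         num = -B + t
--                         if num % (2 * c) == 0:
--                             ys.append(num // (2 * c))
--                     if len(ys) == 2 and ys[0] > ys[1]:
--                         ys.reverse()
--         for y in ys:
--             if -bound <= y <= bound:
--                 sols.append((x, y))
--     return set(sols)
-- ===== Notes on version B (the rewrite author's own statement) =====
-- stated objective: faster
-- what changed: Instead of scanning the full (2*bound+1)^2 grid, B fixes x and solves the resulting quadratic (or linear/degenerate) equation in y exactly via discriminant and integer square root, emitting at most two roots per x (the whole y-range only in the degenerate all-zero case).
import Mathlib
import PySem

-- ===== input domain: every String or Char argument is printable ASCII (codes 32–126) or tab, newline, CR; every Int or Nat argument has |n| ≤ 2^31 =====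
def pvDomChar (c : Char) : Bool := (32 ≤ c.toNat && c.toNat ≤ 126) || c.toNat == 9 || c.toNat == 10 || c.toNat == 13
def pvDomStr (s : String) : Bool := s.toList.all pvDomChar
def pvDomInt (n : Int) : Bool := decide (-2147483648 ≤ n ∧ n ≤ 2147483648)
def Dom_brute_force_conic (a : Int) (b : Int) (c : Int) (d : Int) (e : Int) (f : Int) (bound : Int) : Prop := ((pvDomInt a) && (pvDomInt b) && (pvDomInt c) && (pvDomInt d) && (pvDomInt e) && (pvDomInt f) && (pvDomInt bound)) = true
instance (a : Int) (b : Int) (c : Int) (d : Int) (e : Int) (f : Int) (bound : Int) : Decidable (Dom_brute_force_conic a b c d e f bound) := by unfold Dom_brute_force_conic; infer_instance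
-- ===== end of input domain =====

-- B replaces A's O(bound^2) grid scan by solving, for each x, the quadratic in y exactly
-- (discriminant + integer square root), an asymptotically faster O(bound) algorithm.

-- ===== PORT A =====
def brute_force_conic (a : Int) (b : Int) (c : Int) (d : Int) (e : Int) (f : Int) (bound : Int) : List (Int × Int) :=
  (PySem.List.pyRange (-bound) (bound + 1) 1).foldl (fun sols x =>
    (PySem.List.pyRange (-bound) (bound + 1) 1).foldl (fun sols y =>
      let v := a * x * x + b * x * y + c * y * y + d * x + e * y + f
      if v = 0 then PySem.Set.add sols (x, y) else sols) sols) []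

-- ===== PORT B =====
-- the y-solutions computed for one x (B's quadratic/linear/degenerate case split)
def bfc_ys (a : Int) (b : Int) (c : Int) (d : Int) (e : Int) (f : Int) (bound : Int) (x : Int) : List Int :=
  let B := b * x + e
  let C := a * x * x + d * x + f
  if c = 0 then
    if B = 0 then
      (if C = 0 then PySem.List.pyRange (-bound) (bound + 1) 1 else [])
    else
      let q := PySem.Int.floordiv (-C) B
      let r := PySem.Int.mod (-C) B
      if r = 0 then [q] else []
  else
    let disc := B * B - 4 * c * C
    if disc < 0 then []
    else
      let s := Int.sqrt disc
      if s * s ≠ disc then []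
      else
        let ys := (if s > 0 then [-s, s] else [0]).foldl (fun ys t =>
          let num := -B + t
          if PySem.Int.mod num (2 * c) = 0 then ys ++ [PySem.Int.floordiv num (2 * c)] else ys) []
        if ys.length = 2 ∧ PySem.List.pyGetD ys 0 0 > PySem.List.pyGetD ys 1 0 then ys.reverse else ys

def brute_force_conic_alt (a : Int) (b : Int) (c : Int) (d : Int) (e : Int) (f : Int) (bound : Int) : List (Int × Int) :=
  PySem.Set.ofList ((PySem.List.pyRange (-bound) (bound + 1) 1).foldl (fun sols x =>
    (bfc_ys a b c d e f bound x).foldl (fun sols y =>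
      if -bound ≤ y ∧ y ≤ bound then sols ++ [(x, y)] else sols) sols) [])

-- ===== PRECONDITION & SPEC =====
def Spec_brute_force_conic (a : Int) (b : Int) (c : Int) (d : Int) (e : Int) (f : Int) (bound : Int) (out : List (Int × Int)) : Prop := out = brute_force_conic_alt a b c d e f bound
instance (a : Int) (b : Int) (c : Int) (d : Int) (e : Int) (f : Int) (bound : Int) (out : List (Int × Int)) : Decidable (Spec_brute_force_conic a b c d e f bound out) := by unfold Spec_brute_force_conic; infer_instance

-- ===== CLAIM (what is proved, stated in full; the proofs are below) =====
def Claim_equal_brute_force_conic : Prop := ∀ (a : Int) (b : Int) (c : Int) (d : Int) (e : Int) (f : Int) (bound : Int), Dom_brute_force_conic a b c d e f bound → Spec_brute_force_conic a b c d e f bound (brute_force_conic a b c d e f bound)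

-- ===== LEMMAS AND PROOFS =====

-- filter of an increasing integer block by equality with a single value
theorem pv_filter_single (lo : Int) (n : Nat) (r : Int) :
    ((List.range n).map (fun (k : Nat) => lo + (k : Int))).filter (fun y => decide (y = r)) =
      if lo ≤ r ∧ r < lo + n then [r] else [] := by
  induction n with
  | zero => simp
  | succ n ih =>
      rw [List.range_succ, List.map_append, List.filter_append, ih]
      simp only [List.map_cons, List.map_nil, List.filter_cons, List.filter_nil]
      push_cast
      split_ifs <;> simp_all <;> omega

theorem pv_filter_pair (lo : Int) (n : Nat) (r1 r2 : Int) (h : r1 < r2) :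
    ((List.range n).map (fun (k : Nat) => lo + (k : Int))).filter (fun y => decide (y = r1 ∨ y = r2)) =
      (if lo ≤ r1 ∧ r1 < lo + n then [r1] else []) ++ (if lo ≤ r2 ∧ r2 < lo + n then [r2] else []) := by
  induction n with
  | zero => simp
  | succ n ih =>
      rw [List.range_succ, List.map_append, List.filter_append, ih]
      simp only [List.map_cons, List.map_nil, List.filter_cons, List.filter_nil]
      push_cast
      split_ifs <;> simp_all <;> omega

theorem pv_filter_one (p : Int → Prop) [DecidablePred p] (r : Int) :
    List.filter (fun y => decide (p y)) [r] = if p r then [r] else [] := by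
  by_cases h : p r <;> simp [List.filter, h]

theorem pv_filter_two (p : Int → Prop) [DecidablePred p] (r1 r2 : Int) :
    List.filter (fun y => decide (p y)) [r1, r2] =
      (if p r1 then [r1] else []) ++ (if p r2 then [r2] else []) := by
  by_cases h1 : p r1 <;> by_cases h2 : p r2 <;> simp [List.filter, h1, h2]

-- B's reverse-guard is inert on lists of length ≠ 2
theorem pv_guard_one (q : Int) :
    (if ([q].length = 2 ∧ PySem.List.pyGetD [q] 0 0 > PySem.List.pyGetD [q] 1 0) then
      [q].reverse else [q]) = [q] := by
  rw [if_neg]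
  intro hg
  simp at hg

theorem pv_guard_nil :
    (if (([] : List Int).length = 2 ∧ PySem.List.pyGetD ([] : List Int) 0 0 > PySem.List.pyGetD ([] : List Int) 1 0) then
      ([] : List Int).reverse else ([] : List Int)) = [] := by
  rw [if_neg]
  intro hg
  simp at hg

-- solving M*y = num over an increasing integer block (M ≠ 0): at most the one candidate num // M
theorem pv_filter_solve (lo : Int) (n : Nat) (M num : Int) (hM : M ≠ 0) :
    ((List.range n).map (fun (k : Nat) => lo + (k : Int))).filter (fun y => decide (M * y = num)) =
      if PySem.Int.mod num M = 0 then
        (if lo ≤ PySem.Int.floordiv num M ∧ PySem.Int.floordiv num M < lo + n then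
          [PySem.Int.floordiv num M] else [])
      else [] := by
  by_cases hd : PySem.Int.mod num M = 0
  · have hq : M * PySem.Int.floordiv num M = num := by
      have h := PySem.Int.floordiv_mul_add_mod num M
      rw [hd] at h
      linarith [h]
    rw [List.filter_congr (fun y _ => ?_), pv_filter_single lo n (PySem.Int.floordiv num M)]
    · rw [if_pos hd]
    · simp only [decide_eq_decide]
      exact ⟨fun h => mul_left_cancel₀ hM (h.trans hq.symm), fun h => h ▸ hq⟩
  · rw [if_neg hd, List.filter_eq_nil_iff.mpr]
    intro y _
    simp only [decide_eq_true_eq]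
    intro h
    exact hd ((PySem.Int.mod_eq_zero_iff_dvd num M).mpr ⟨y, h.symm⟩)

-- the per-x heart: A's inner scan, as a filter of the y-range, equals B's root list filtered to the range
theorem pv_inner_eq (a b c d e f bound x : Int) :
    (PySem.List.pyRange (-bound) (bound + 1) 1).filter
        (fun y => decide (a * x * x + b * x * y + c * y * y + d * x + e * y + f = 0)) =
      (bfc_ys a b c d e f bound x).filter (fun y => decide (-bound ≤ y ∧ y ≤ bound)) := by
  have hrw : ∀ y : Int, a * x * x + b * x * y + c * y * y + d * x + e * y + f
      = c * y * y + (b * x + e) * y + (a * x * x + d * x + f) := fun y => by ring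
  simp only [hrw, bfc_ys]
  set B := b * x + e with hBdef
  set C := a * x * x + d * x + f with hCdef
  have hrange := PySem.List.pyRange_one (-bound) (bound + 1)
  set n := ((bound + 1) - (-bound)).toNat with hndef
  have hnc : (n : Int) = max (2 * bound + 1) 0 := by
    rw [hndef, Int.toNat_eq_max]; ring_nf
  have hiff : ∀ y : Int, ((-bound) ≤ y ∧ y < (-bound) + (n : Int)) ↔ ((-bound) ≤ y ∧ y ≤ bound) := by
    intro y; omega
  have hmemrange : ∀ y ∈ (List.range n).map (fun (k : Nat) => (-bound) + (k : Int)),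
      (-bound) ≤ y ∧ y ≤ bound := by
    intro y hy
    rcases List.mem_map.mp hy with ⟨k, hk, rfl⟩
    have := List.mem_range.mp hk
    omega
  rw [hrange]
  by_cases hc : c = 0
  · rw [if_pos hc]
    by_cases hB0 : B = 0
    · rw [if_pos hB0]
      by_cases hC0 : C = 0
      · -- everything is a solution
        rw [if_pos hC0]
        rw [List.filter_congr (q := fun _ => true) (fun y _ => by simp [hc, hB0, hC0]),
          List.filter_true]
        exact (List.filter_eq_self.mpr (fun y hy => by simpa using hmemrange y hy)).symm
      · -- no solution at all
        rw [if_neg hC0, List.filter_eq_nil_iff.mpr, List.filter_nil]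
        intro y _
        simp [hc, hB0, hC0]
    · -- linear: B*y + C = 0
      rw [if_neg hB0]
      rw [List.filter_congr (q := fun y => decide (B * y = -C)) (fun y _ => by
        simp only [decide_eq_decide, hc]; constructor <;> (intro h; linarith))]
      rw [pv_filter_solve (-bound) n B (-C) hB0]
      by_cases hr : PySem.Int.mod (-C) B = 0
      · rw [if_pos hr, if_pos hr, pv_filter_one]
        simp only [hiff]
      · rw [if_neg hr, if_neg hr, List.filter_nil]
  · rw [if_neg hc]
    have hM : 2 * c ≠ 0 := by omega
    set disc := B * B - 4 * c * C with hdisc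
    have key : ∀ y : Int, (c * y * y + B * y + C = 0) ↔ (2 * c * y + B) * (2 * c * y + B) = disc := by
      intro y
      constructor
      · intro h; linear_combination (4 * c) * h
      · intro h
        have h2 : (4 * c) * (c * y * y + B * y + C) = 0 := by linear_combination h
        rcases mul_eq_zero.mp h2 with h4 | h
        · omega
        · exact h
    by_cases hdn : disc < 0
    · rw [if_pos hdn, List.filter_nil, List.filter_eq_nil_iff.mpr]
      intro y _
      simp only [decide_eq_true_eq]
      intro h
      have := (key y).mp h
      nlinarith [mul_self_nonneg (2 * c * y + B)]
    · rw [if_neg hdn]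
      set s := Int.sqrt disc with hsdef
      have hs0 : 0 ≤ s := Int.sqrt_nonneg disc
      by_cases hss : s * s ≠ disc
      · rw [if_pos hss, List.filter_nil, List.filter_eq_nil_iff.mpr]
        intro y _
        simp only [decide_eq_true_eq]
        intro h
        have ht := (key y).mp h
        apply hss
        rw [hsdef, ← ht, Int.sqrt_eq, ← Int.natCast_mul, Int.natAbs_mul_self]
      · rw [if_neg hss]
        rw [not_ne_iff] at hss
        -- facts about exact division by 2*c
        have hexact : ∀ num : Int, PySem.Int.mod num (2 * c) = 0 →
            2 * c * PySem.Int.floordiv num (2 * c) = num := by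
          intro num h
          have h2 := PySem.Int.floordiv_mul_add_mod num (2 * c)
          rw [h] at h2
          linarith [h2]
        have hsolve : ∀ num : Int, PySem.Int.mod num (2 * c) = 0 →
            ∀ y : Int, (2 * c * y = num ↔ y = PySem.Int.floordiv num (2 * c)) := by
          intro num h y
          constructor
          · intro hy; exact mul_left_cancel₀ hM (hy.trans (hexact num h).symm)
          · intro hy; exact hy ▸ hexact num h
        have hnone : ∀ num : Int, PySem.Int.mod num (2 * c) ≠ 0 → ∀ y : Int, ¬ (2 * c * y = num) := by
          intro num h y hy
          exact h ((PySem.Int.mod_eq_zero_iff_dvd num (2 * c)).mpr ⟨y, hy.symm⟩)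
        have tiff : ∀ y : Int, (c * y * y + B * y + C = 0) ↔
            (2 * c * y = -B + -s ∨ 2 * c * y = -B + s) := by
          intro y
          rw [key y]
          constructor
          · intro h
            have hz : ((2 * c * y + B) - s) * ((2 * c * y + B) + s) = 0 := by
              linear_combination h - hss
            rcases mul_eq_zero.mp hz with h1 | h1
            · right; omega
            · left; omega
          · rintro (h | h)
            · have h2 : 2 * c * y + B = -s := by omega
              rw [h2]; linear_combination hss
            · have h2 : 2 * c * y + B = s := by omega
              rw [h2]; exact hss
        rw [List.filter_congr
          (q := fun y => decide (2 * c * y = -B + -s ∨ 2 * c * y = -B + s))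
          (fun y _ => by simp only [decide_eq_decide]; exact tiff y)]
        by_cases hspos : s > 0
        · rw [if_pos hspos]
          simp only [List.foldl_cons, List.foldl_nil, List.nil_append]
          by_cases hd1 : PySem.Int.mod (-B + -s) (2 * c) = 0 <;>
            by_cases hd2 : PySem.Int.mod (-B + s) (2 * c) = 0
          · -- both roots integral
            rw [if_pos hd1, if_pos hd2]
            have hq1 := hexact _ hd1
            have hq2 := hexact _ hd2
            set q1 := PySem.Int.floordiv (-B + -s) (2 * c) with hq1def
            set q2 := PySem.Int.floordiv (-B + s) (2 * c) with hq2def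
            have hne : q1 ≠ q2 := by
              intro hqq
              rw [hqq] at hq1
              omega
            rw [List.filter_congr (q := fun y => decide (y = q1 ∨ y = q2)) (fun y _ => by
              simp only [decide_eq_decide]
              exact or_congr (hsolve _ hd1 y) (hsolve _ hd2 y))]
            simp only [List.singleton_append]
            have hget0 : PySem.List.pyGetD [q1, q2] 0 0 = q1 := rfl
            have hget1 : PySem.List.pyGetD [q1, q2] 1 0 = q2 := rfl
            by_cases hqlt : q1 < q2
            · rw [if_neg (by rw [hget0, hget1]; intro hg; omega)]
              rw [pv_filter_pair (-bound) n q1 q2 hqlt, pv_filter_two]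
              simp only [hiff]
            · have hgt : q2 < q1 := by omega
              rw [if_pos ⟨rfl, by rw [hget0, hget1]; omega⟩]
              simp only [List.reverse_cons, List.reverse_nil, List.nil_append,
                List.singleton_append]
              rw [List.filter_congr (q := fun y => decide (y = q2 ∨ y = q1)) (fun y _ => by
                simp only [decide_eq_decide]; exact or_comm)]
              rw [pv_filter_pair (-bound) n q2 q1 hgt, pv_filter_two]
              simp only [hiff]
          · -- only the smaller-t root integral
            rw [if_pos hd1, if_neg hd2]
            rw [List.filter_congr (q := fun y => decide (y = PySem.Int.floordiv (-B + -s) (2 * c)))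
              (fun y _ => by
                simp only [decide_eq_decide]
                constructor
                · rintro (h | h)
                  · exact (hsolve _ hd1 y).mp h
                  · exact absurd h (hnone _ hd2 y)
                · intro h; exact Or.inl ((hsolve _ hd1 y).mpr h))]
            rw [pv_guard_one, pv_filter_single, pv_filter_one]
            simp only [hiff]
          · -- only the larger-t root integral
            rw [if_neg hd1, if_pos hd2]
            simp only [List.nil_append]
            rw [List.filter_congr (q := fun y => decide (y = PySem.Int.floordiv (-B + s) (2 * c)))
              (fun y _ => by
                simp only [decide_eq_decide]
                constructor
                · rintro (h | h)
                  · exact absurd h (hnone _ hd1 y)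
                  · exact (hsolve _ hd2 y).mp h
                · intro h; exact Or.inr ((hsolve _ hd2 y).mpr h))]
            rw [pv_guard_one, pv_filter_single, pv_filter_one]
            simp only [hiff]
          · -- no integral root
            rw [if_neg hd1, if_neg hd2]
            rw [pv_guard_nil, List.filter_nil, List.filter_eq_nil_iff.mpr]
            intro y _
            simp only [decide_eq_true_eq]
            rintro (h | h)
            · exact hnone _ hd1 y h
            · exact hnone _ hd2 y h
        · -- s = 0 : double root
          have hs0' : s = 0 := by omega
          rw [if_neg hspos]
          simp only [List.foldl_cons, List.foldl_nil, List.nil_append, hs0', neg_zero, add_zero]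
          rw [List.filter_congr (q := fun y => decide (2 * c * y = -B)) (fun y _ => by
            simp)]
          rw [pv_filter_solve (-bound) n (2 * c) (-B) hM]
          by_cases hd : PySem.Int.mod (-B) (2 * c) = 0
          · simp only [if_pos hd]
            rw [pv_guard_one, pv_filter_one]
            simp only [hiff]
          · simp only [if_neg hd]
            rw [pv_guard_nil, List.filter_nil]

-- A's inner loop over a duplicate-free list appends exactly the filtered pairs
theorem pv_foldA_inner (x : Int) (p : Int → Prop) [DecidablePred p] (L : List Int) (hL : L.Nodup)
    (s : List (Int × Int)) (hs : ∀ y ∈ L, (x, y) ∉ s) :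
    L.foldl (fun s y => if p y then PySem.Set.add s (x, y) else s) s =
      s ++ (L.filter (fun y => decide (p y))).map (fun y => (x, y)) := by
  induction L generalizing s with
  | nil => simp
  | cons y L ih =>
      have hyns : (x, y) ∉ s := hs y (by simp)
      have hadd : PySem.Set.add s (x, y) = s ++ [(x, y)] := by
        simp [PySem.Set.add, PySem.Set.contains, hyns]
      by_cases hy : p y
      · simp only [List.foldl_cons, if_pos hy, hadd]
        rw [ih (List.Nodup.of_cons hL) _ ?_]
        · simp [hy]
        · intro z hz
          simp only [List.mem_append, List.mem_singleton]
          rintro (h | h)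
          · exact hs z (by simp [hz]) h
          · have : z = y := by
              have := Prod.mk.injEq x z x y ▸ h
              simpa using h
            rw [List.nodup_cons] at hL
            exact hL.1 (this ▸ hz)
      · simp only [List.foldl_cons, if_neg hy]
        rw [ih (List.Nodup.of_cons hL) _ (fun z hz => hs z (by simp [hz]))]
        simp [hy]

-- B's inner loop appends exactly the filtered pairs
theorem pv_foldB_inner (x : Int) (p : Int → Prop) [DecidablePred p] (L : List Int)
    (s : List (Int × Int)) :
    L.foldl (fun s y => if p y then s ++ [(x, y)] else s) s =
      s ++ (L.filter (fun y => decide (p y))).map (fun y => (x, y)) := by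
  induction L generalizing s with
  | nil => simp
  | cons y L ih =>
      by_cases hy : p y
      · simp only [List.foldl_cons, if_pos hy, ih]
        simp [hy]
      · simp only [List.foldl_cons, if_neg hy, ih]
        simp [hy]

-- A's outer loop produces the flatMap of per-x filtered pairs
theorem pv_foldA_outer (a b c d e f bound : Int) (xs : List Int) (hxs : xs.Nodup)
    (s : List (Int × Int)) (hs : ∀ q ∈ s, q.1 ∉ xs) :
    xs.foldl (fun s x =>
        (PySem.List.pyRange (-bound) (bound + 1) 1).foldl (fun s y =>
          let v := a * x * x + b * x * y + c * y * y + d * x + e * y + f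
          if v = 0 then PySem.Set.add s (x, y) else s) s) s =
      s ++ xs.flatMap (fun x =>
        ((PySem.List.pyRange (-bound) (bound + 1) 1).filter
          (fun y => decide (a * x * x + b * x * y + c * y * y + d * x + e * y + f = 0))).map (fun y => (x, y))) := by
  induction xs generalizing s with
  | nil => simp
  | cons x xs ih =>
      rw [List.nodup_cons] at hxs
      simp only [List.foldl_cons]
      rw [pv_foldA_inner x (fun y => a * x * x + b * x * y + c * y * y + d * x + e * y + f = 0)
        _ (PySem.List.nodup_pyRange_one _ _) s (fun y _ hmem => hs _ hmem (by simp))]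
      rw [ih hxs.2 _ ?_]
      · simp [List.flatMap_cons]
      · intro q hq
        rcases List.mem_append.mp hq with h | h
        · exact fun hc => hs q h (by simp [hc])
        · rcases List.mem_map.mp h with ⟨y, _, rfl⟩
          exact hxs.1

-- B's outer loop produces the flatMap of per-x filtered pairs
theorem pv_foldB_outer (a b c d e f bound : Int) (xs : List Int) (s : List (Int × Int)) :
    xs.foldl (fun s x =>
        (bfc_ys a b c d e f bound x).foldl (fun s y =>
          if -bound ≤ y ∧ y ≤ bound then s ++ [(x, y)] else s) s) s =
      s ++ xs.flatMap (fun x =>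
        ((bfc_ys a b c d e f bound x).filter (fun y => decide (-bound ≤ y ∧ y ≤ bound))).map (fun y => (x, y))) := by
  induction xs generalizing s with
  | nil => simp
  | cons x xs ih =>
      simp only [List.foldl_cons]
      rw [pv_foldB_inner x (fun y => -bound ≤ y ∧ y ≤ bound) _ s, ih]
      simp [List.flatMap_cons]

-- folding Set.add over a duplicate-free disjoint list just appends it
theorem pv_foldl_add_append (L s : List (Int × Int)) (hL : L.Nodup) (hs : ∀ q ∈ L, q ∉ s) :
    L.foldl PySem.Set.add s = s ++ L := by
  induction L generalizing s with
  | nil => simp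
  | cons q L ih =>
      have hq : q ∉ s := hs q (by simp)
      have hadd : PySem.Set.add s q = s ++ [q] := by
        simp [PySem.Set.add, PySem.Set.contains, hq]
      simp only [List.foldl_cons, hadd]
      rw [ih _ (List.Nodup.of_cons hL) ?_]
      · simp
      · intro z hz
        simp only [List.mem_append, List.mem_singleton]
        rintro (h | h)
        · exact hs z (by simp [hz]) h
        · rw [List.nodup_cons] at hL
          exact hL.1 (h ▸ hz)

theorem pv_ofList_nodup (L : List (Int × Int)) (hL : L.Nodup) : PySem.Set.ofList L = L := by
  rw [PySem.Set.ofList_eq_foldl]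
  exact (pv_foldl_add_append L [] hL (by simp)).trans (by simp)

theorem pv_nodup_flatMap (xs : List Int) (g : Int → List Int) (hxs : xs.Nodup)
    (hg : ∀ x, (g x).Nodup) :
    (xs.flatMap (fun x => (g x).map (fun y => (x, y)))).Nodup := by
  induction xs with
  | nil => simp
  | cons x xs ih =>
      rw [List.nodup_cons] at hxs
      rw [List.flatMap_cons]
      refine List.Nodup.append ?_ (ih hxs.2) ?_
      · exact (hg x).map (fun y z h => by simpa using (Prod.mk.injEq x y x z ▸ h).2) |>.imp id
      · intro q hq hq2
        rcases List.mem_map.mp hq with ⟨y, _, rfl⟩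
        rcases List.mem_flatMap.mp hq2 with ⟨x2, hx2, hq3⟩
        rcases List.mem_map.mp hq3 with ⟨y2, _, hqe⟩
        have : x2 = x := (Prod.mk.injEq x2 y2 x y ▸ hqe).1
        exact hxs.1 (this ▸ hx2)

-- ===== VERDICT (by name: the statement is the Claim_ definition above) =====
theorem brute_force_conic_spec : Claim_equal_brute_force_conic := by
  intro a b c d e f bound _
  unfold Spec_brute_force_conic brute_force_conic brute_force_conic_alt
  rw [pv_foldA_outer a b c d e f bound _ (PySem.List.nodup_pyRange_one _ _) [] (by simp),
    pv_foldB_outer a b c d e f bound]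
  have hfg : (fun x => ((PySem.List.pyRange (-bound) (bound + 1) 1).filter
        (fun y => decide (a * x * x + b * x * y + c * y * y + d * x + e * y + f = 0))).map
        (fun y => (x, y)))
      = (fun x => ((bfc_ys a b c d e f bound x).filter
        (fun y => decide (-bound ≤ y ∧ y ≤ bound))).map (fun y => (x, y))) := by
    funext x
    rw [pv_inner_eq]
  simp only [List.nil_append]
  rw [← hfg, pv_ofList_nodup]
  exact pv_nodup_flatMap _ _ (PySem.List.nodup_pyRange_one _ _)
    (fun x => (PySem.List.nodup_pyRange_one _ _).filter _)
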